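-- pv_equiv track=rewrite | github.com/erenyceylan/python-exercises | prime_factor.py | raw_to_power
-- ===== SOURCE A (Python) =====
-- def raw_to_power(somelist):
-- 	powers = []
-- 	sentence = ""
-- 	j = 0
-- 	for i in sorted(set(somelist)):
-- 		powers.append(somelist.count(i))
-- 	while j < len(powers):
-- 		sentence += "%d^%d "%(sorted(list(set(somelist)))[j],powers[j])
-- 		j += 1
-- 	return sentence
-- ===== SOURCE B (Python) =====
-- def raw_to_power(somelist):
--     xs = sorted(somelist)
--     sentence = ""
--     while xs:
--         v = xs[0]
--         k = 1
--         while k < len(xs) and xs[k] == v: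
--             k += 1
--         sentence += "%d^%d " % (v, k)
--         xs = xs[k:]
--     return sentence
-- ===== Notes on version B (the rewrite author's own statement) =====
-- stated objective: faster
-- what changed: B sorts the whole list once and emits run-length groups in a single scan, instead of A's set + per-element .count() scans and a second index loop that re-sorts the set on every iteration.
import Mathlib
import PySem

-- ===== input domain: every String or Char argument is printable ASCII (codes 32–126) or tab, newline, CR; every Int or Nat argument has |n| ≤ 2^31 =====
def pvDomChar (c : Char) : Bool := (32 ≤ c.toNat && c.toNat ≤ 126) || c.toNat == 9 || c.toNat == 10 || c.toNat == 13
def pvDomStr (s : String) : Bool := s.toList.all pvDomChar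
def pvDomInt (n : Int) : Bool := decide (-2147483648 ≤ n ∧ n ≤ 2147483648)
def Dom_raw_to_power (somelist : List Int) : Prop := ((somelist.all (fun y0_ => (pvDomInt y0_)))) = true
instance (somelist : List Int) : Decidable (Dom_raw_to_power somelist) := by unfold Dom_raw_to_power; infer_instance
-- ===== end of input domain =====

-- B sorts once and emits run-length groups in one scan; A's per-value .count() scans and per-iteration re-sorting of the set are gone (objective: faster).

-- ===== PORT A =====
-- A's while-loop: j is the index into powers; 'sorted(list(set(somelist)))' is recomputed each iteration, as in A
def pvLoopA (somelist powers : List Int) (j : Nat) (sentence : String) : String :=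
  if _h : j < powers.length then
    pvLoopA somelist powers (j + 1)
      (sentence ++
        PySem.Int.toStr (PySem.List.pyGetD (PySem.List.sorted (PySem.Set.ofList somelist) (fun x => x) false) (j : Int) 0) ++
        "^" ++ PySem.Int.toStr (PySem.List.pyGetD powers (j : Int) 0) ++ " ")
  else sentence
termination_by powers.length - j

def raw_to_power (somelist : List Int) : String :=
  let powers : List Int :=
    (PySem.List.sorted (PySem.Set.ofList somelist) (fun x => x) false).foldl
      (fun acc i => acc ++ [(PySem.List.count somelist i : Int)]) []
  pvLoopA somelist powers 0 ""

-- ===== PORT B =====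
-- inner while: how many leading elements of the tail equal v
def pvRun (v : Int) : List Int → Nat
  | [] => 0
  | x :: t => if x = v then pvRun v t + 1 else 0

-- outer while over the sorted list: emit "v^k " and continue after the run
def pvGroups (xs : List Int) (sentence : String) : String :=
  match xs with
  | [] => sentence
  | v :: t =>
      pvGroups (t.drop (pvRun v t))
        (sentence ++ PySem.Int.toStr v ++ "^" ++ PySem.Int.toStr ((pvRun v t + 1 : Nat) : Int) ++ " ")
termination_by xs.length
decreasing_by simp

def raw_to_power_alt (somelist : List Int) : String :=
  pvGroups (PySem.List.sorted somelist (fun x => x) false) ""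

-- ===== PRECONDITION & SPEC =====
def Spec_raw_to_power (somelist : List Int) (out : String) : Prop := out = raw_to_power_alt somelist
instance (somelist : List Int) (out : String) : Decidable (Spec_raw_to_power somelist out) := by unfold Spec_raw_to_power; infer_instance

-- ===== CLAIM (what is proved, stated in full; the proofs are below) =====
def Claim_equal_raw_to_power : Prop := ∀ (somelist : List Int), Dom_raw_to_power somelist → Spec_raw_to_power somelist (raw_to_power somelist)

-- ===== LEMMAS AND PROOFS =====

-- canonical form both sides are reduced to: one "v^c " entry per pair
def pvJ : List (Int × Int) → String
  | [] => ""
  | (v, c) :: t => PySem.Int.toStr v ++ "^" ++ PySem.Int.toStr c ++ " " ++ pvJ t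

theorem pvAdd_mem {s : List Int} {x : Int} (h : x ∈ s) : PySem.Set.add s x = s := by
  simp [PySem.Set.add, PySem.Set.contains, h]

theorem pvFoldl_add_replicate (k : Nat) (s : List Int) (x : Int) (h : x ∈ s) :
    List.foldl PySem.Set.add s (List.replicate k x) = s := by
  induction k with
  | zero => rfl
  | succ n ih => simp [List.replicate_succ, pvAdd_mem h, ih]

theorem pvFoldl_add_cons : ∀ (l s : List Int) (x : Int), x ∉ l →
    List.foldl PySem.Set.add (x :: s) l = x :: List.foldl PySem.Set.add s l := by
  intro l
  induction l with
  | nil => intro s x _; rfl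
  | cons y t ih =>
    intro s x hx
    have hyx : ¬ (y = x) := by rintro rfl; exact hx (List.mem_cons_self ..)
    have hadd : PySem.Set.add (x :: s) y = x :: PySem.Set.add s y := by
      by_cases hy : y ∈ s
      · simp [PySem.Set.add, PySem.Set.contains, hy, hyx]
      · simp [PySem.Set.add, PySem.Set.contains, hy, hyx]
    simp only [List.foldl_cons, hadd]
    exact ih _ x (fun h => hx (List.mem_cons_of_mem _ h))

theorem pvRun_spec (v : Int) : ∀ (rest : List Int), rest.Pairwise (· ≤ ·) → (∀ y ∈ rest, v ≤ y) →
    pvRun v rest = rest.count v ∧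
    rest.take (pvRun v rest) = List.replicate (pvRun v rest) v ∧
    ∀ y ∈ rest.drop (pvRun v rest), v < y := by
  intro rest
  induction rest with
  | nil => simp [pvRun]
  | cons x t ih =>
    intro hp hv
    have hxt := (List.pairwise_cons.mp hp).1
    have hp' := (List.pairwise_cons.mp hp).2
    by_cases hx : x = v
    · subst hx
      obtain ⟨h1, h2, h3⟩ := ih hp' hxt
      refine ⟨?_, ?_, ?_⟩
      · simp [pvRun, h1]
      · simp [pvRun, List.replicate_succ, h2]
      · simpa [pvRun] using h3
    · have hvx : v < x := lt_of_le_of_ne (hv x (by simp)) (fun h => hx h.symm)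
      have hnv : v ∉ x :: t := by
        intro hmem
        rcases List.mem_cons.mp hmem with h | h
        · exact hx h.symm
        · exact absurd (lt_of_lt_of_le hvx (hxt v h)) (lt_irrefl v)
      refine ⟨?_, by simp [pvRun, hx], ?_⟩
      · simp [pvRun, hx, List.count_eq_zero.mpr hnv]
      · intro y hy
        simp only [pvRun, hx, if_false, List.drop_zero] at hy
        rcases List.mem_cons.mp hy with h | h
        · exact h ▸ hvx
        · exact lt_of_lt_of_le hvx (hxt y h)

theorem pvMain : ∀ (n : Nat) (ys : List Int), ys.length ≤ n → ys.Pairwise (· ≤ ·) →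
    (PySem.Set.ofList ys).Pairwise (· < ·) ∧
    ∀ acc, pvGroups ys acc =
      acc ++ pvJ ((PySem.Set.ofList ys).map (fun w => (w, (ys.count w : Int)))) := by
  intro n
  induction n with
  | zero =>
    intro ys h _
    obtain rfl : ys = [] := List.eq_nil_of_length_eq_zero (Nat.le_zero.mp h)
    exact ⟨by simp [PySem.Set.ofList], fun acc => by simp [pvGroups, PySem.Set.ofList, pvJ]⟩
  | succ n ih =>
    intro ys hlen hp
    match ys with
    | [] => exact ⟨by simp [PySem.Set.ofList], fun acc => by simp [pvGroups, PySem.Set.ofList, pvJ]⟩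
    | v :: t =>
      have hvt := (List.pairwise_cons.mp hp).1
      have hp' := (List.pairwise_cons.mp hp).2
      obtain ⟨hc, htake, hdrop⟩ := pvRun_spec v t hp' hvt
      set k := pvRun v t with hk
      set t' := t.drop k with ht'
      have hsplit : t = List.replicate k v ++ t' := by
        conv_lhs => rw [← List.take_append_drop k t]
        rw [← htake]
      have hvnot : v ∉ t' := fun h => absurd (hdrop v h) (lt_irrefl v)
      have hofl : PySem.Set.ofList (v :: t) = v :: PySem.Set.ofList t' := by
        rw [PySem.Set.ofList_eq_foldl, PySem.Set.ofList_eq_foldl]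
        have h0 : List.foldl PySem.Set.add ([] : List Int) (v :: t)
            = List.foldl PySem.Set.add [v] t := by
          simp [PySem.Set.add, PySem.Set.contains]
        rw [h0, hsplit, List.foldl_append,
            pvFoldl_add_replicate k [v] v (by simp),
            pvFoldl_add_cons t' [] v hvnot]
      have hp'' : t'.Pairwise (· ≤ ·) := hp'.sublist (List.drop_sublist k t)
      have hlen' : t'.length ≤ n := by
        have h1 : t'.length ≤ t.length := by simp [ht']
        have h2 : t.length + 1 ≤ n + 1 := by simpa using hlen
        omega
      obtain ⟨hpw', hrec⟩ := ih t' hlen' hp''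
      have hmem' : ∀ w ∈ PySem.Set.ofList t', v < w := by
        intro w hw
        exact hdrop w ((PySem.Set.mem_ofList t' w).mp hw)
      constructor
      · rw [hofl]
        exact List.pairwise_cons.mpr ⟨hmem', hpw'⟩
      · intro acc
        have hcount_v : ((v :: t).count v : Int) = ((k + 1 : Nat) : Int) := by
          have : (v :: t).count v = t.count v + 1 := by simp
          rw [this, ← hc]
        have hmapeq : (PySem.Set.ofList t').map (fun w => (w, ((v :: t).count w : Int)))
            = (PySem.Set.ofList t').map (fun w => (w, (t'.count w : Int))) := by
          apply List.map_congr_left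
          intro w hw
          have hne : ¬ (v = w) := fun h => absurd (h ▸ hmem' w hw) (lt_irrefl v)
          have : (v :: t).count w = t'.count w := by
            rw [List.count_cons, hsplit, List.count_append]
            simp [hne, List.count_replicate]
          rw [this]
        rw [pvGroups, hrec, hofl, List.map_cons, pvJ, hmapeq, hcount_v, hk]
        simp [String.append_assoc]

theorem pvZip_self_map {α β : Type} (f : α → β) : ∀ (L : List α), L.zip (L.map f) = L.map (fun w => (w, f w))
  | [] => rfl
  | x :: t => by simp [pvZip_self_map f t]

theorem pvLoopA_eq (somelist powers : List Int)
    (hlen : (PySem.List.sorted (PySem.Set.ofList somelist) (fun x => x) false).length = powers.length) :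
    ∀ (m j : Nat) (sentence : String), powers.length - j ≤ m →
      pvLoopA somelist powers j sentence =
        sentence ++ pvJ (((PySem.List.sorted (PySem.Set.ofList somelist) (fun x => x) false).drop j).zip (powers.drop j)) := by
  intro m
  induction m with
  | zero =>
    intro j sentence h
    have hj : powers.length ≤ j := by omega
    rw [pvLoopA]
    simp [List.drop_eq_nil_of_le hj, String.append_empty, pvJ, Nat.not_lt.mpr hj]
  | succ m ih =>
    intro j sentence h
    by_cases hj : j < powers.length
    · rw [pvLoopA, dif_pos hj]
      rw [ih (j + 1) _ (by omega)]
      have hjS : j < (PySem.List.sorted (PySem.Set.ofList somelist) (fun x => x) false).length := by omega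
      rw [List.drop_eq_getElem_cons hjS, List.drop_eq_getElem_cons hj]
      simp only [List.zip_cons_cons, pvJ]
      rw [PySem.List.pyGetD_natCast, PySem.List.pyGetD_natCast,
          List.getD_eq_getElem _ _ hjS, List.getD_eq_getElem _ _ hj]
      simp [String.append_assoc]
    · rw [pvLoopA, dif_neg hj]
      have hj' : powers.length ≤ j := Nat.le_of_not_lt hj
      simp [List.drop_eq_nil_of_le hj', pvJ, String.append_empty]

theorem raw_to_power_spec : Claim_equal_raw_to_power := by
  intro l _
  show raw_to_power l = raw_to_power_alt l
  have hperm : (PySem.List.sorted l (fun x => x) false).Perm l := PySem.List.sorted_perm l _ false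
  have hpw : (PySem.List.sorted l (fun x => x) false).Pairwise (· ≤ ·) := by
    simpa using PySem.List.sorted_pairwise l (fun x => x)
  obtain ⟨hlt, hB⟩ := pvMain (PySem.List.sorted l (fun x => x) false).length _ le_rfl hpw
  have hpermset : (PySem.Set.ofList (PySem.List.sorted l (fun x => x) false)).Perm (PySem.Set.ofList l) := by
    rw [List.perm_ext_iff_of_nodup (PySem.Set.nodup_ofList _) (PySem.Set.nodup_ofList _)]
    intro a
    rw [PySem.Set.mem_ofList, PySem.Set.mem_ofList, hperm.mem_iff]
  have hS : PySem.List.sorted (PySem.Set.ofList l) (fun x => x) false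
      = PySem.Set.ofList (PySem.List.sorted l (fun x => x) false) :=
    PySem.List.sorted_eq_of_perm_of_pairwise_lt _ _ _ hpermset hlt
  have hlen : (PySem.List.sorted (PySem.Set.ofList l) (fun x => x) false).length
      = ((PySem.Set.ofList (PySem.List.sorted l (fun x => x) false)).map
          (fun i => (PySem.List.count l i : Int))).length := by
    rw [hS]; simp
  have hL := pvLoopA_eq l
      ((PySem.Set.ofList (PySem.List.sorted l (fun x => x) false)).map
        (fun i => (PySem.List.count l i : Int))) hlen
  have hzip : (PySem.List.sorted (PySem.Set.ofList l) (fun x => x) false).zip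
        ((PySem.Set.ofList (PySem.List.sorted l (fun x => x) false)).map (fun i => (PySem.List.count l i : Int)))
      = (PySem.Set.ofList (PySem.List.sorted l (fun x => x) false)).map
          (fun w => (w, ((PySem.List.sorted l (fun x => x) false).count w : Int))) := by
    rw [hS, pvZip_self_map]
    apply List.map_congr_left
    intro w _
    rw [hperm.count_eq, PySem.List.count_eq]
  simp only [raw_to_power, raw_to_power_alt]
  rw [PySem.List.foldl_append_singleton_eq_map, List.nil_append]
  rw [hS]
  rw [hL _ 0 "" le_rfl]
  simp only [List.drop_zero, String.empty_append]
  rw [hzip, hB ""]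
  simp [String.empty_append]
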